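-- pv_equiv track=rewrite | github.com/nssathish/adventofcode20xx | 2024/advent_of_code_prob_2.py | all_decreasing
-- ===== SOURCE A (Python) =====
-- def all_decreasing(arr: list[int], tolerate_single_bad_level: bool = False) -> bool:
--     """
--     Determines if all elements in the given list are in strictly decreasing order.
--
--     Args:
--         arr (list[int]): A list of integers to check.
--         tolerate_single_bad_level (bool, optional): If True, allows for a single
--             non-decreasing pair by removing the offending element and rechecking.
--             Defaults to False.
--
--     Returns:
--         bool: True if the list is strictly decreasing (or can be made so by
--         tolerating a single bad level if `tolerate_single_bad_level` is True),
--         otherwise False.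
--     """
--     for i in range(len(arr) - 1):
--         if not (arr[i] > arr[i + 1]):
--             if tolerate_single_bad_level:
--                 del arr[i]
--                 return all_decreasing(arr)
--             else:
--                 return False
--
--     return True
-- ===== SOURCE B (Python) =====
-- def all_decreasing(arr: list[int], tolerate_single_bad_level: bool = False) -> bool:
--     # Find the first index where the strict-decrease condition fails,
--     # then (if tolerated) delete it in place, like A, and re-check once.
--     bad = next((i for i in range(len(arr) - 1) if not arr[i] > arr[i + 1]), None)
--     if bad is None:
--         return True
--     if not tolerate_single_bad_level:
--         return False
--     del arr[bad]
--     return all(arr[j] > arr[j + 1] for j in range(len(arr) - 1))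
-- ===== Notes on version B (the rewrite author's own statement) =====
-- stated objective: simpler
-- what changed: Replaced A's tail-recursive scan (which restarts via a recursive call after the in-place delete) with a flat find-first-violation pass followed by one non-recursive all() re-check of the mutated list.
import Mathlib
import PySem

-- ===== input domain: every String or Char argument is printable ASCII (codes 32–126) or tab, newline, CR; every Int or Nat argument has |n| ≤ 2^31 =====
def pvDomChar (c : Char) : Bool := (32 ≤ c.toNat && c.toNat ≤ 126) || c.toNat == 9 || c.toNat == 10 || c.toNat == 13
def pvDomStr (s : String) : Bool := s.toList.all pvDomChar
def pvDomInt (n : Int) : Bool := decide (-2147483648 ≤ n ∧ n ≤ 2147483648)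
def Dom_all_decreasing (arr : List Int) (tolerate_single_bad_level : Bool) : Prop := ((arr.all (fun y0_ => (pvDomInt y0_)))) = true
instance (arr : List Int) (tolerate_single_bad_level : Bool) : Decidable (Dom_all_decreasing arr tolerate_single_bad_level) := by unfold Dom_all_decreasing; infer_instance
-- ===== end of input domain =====

-- B replaces A's restart-by-recursion scan with a flat find-first-violation pass plus
-- one non-recursive re-check (objective: simpler). Both Pythons mutate arr identically
-- (one `del` in the tolerated case); the equivalence proved here is about the return value.

-- ===== PORT A =====
-- A's for-loop over range(len(arr)-1), with the recursive call after `del arr[i]`.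
def adGo (arr : List Int) (tol : Bool) (i : Nat) : Bool :=
  if i < arr.length - 1 then
    if (PySem.List.pyGet? arr (i : Int)).getD 0 > (PySem.List.pyGet? arr ((i : Int) + 1)).getD 0 then
      adGo arr tol (i + 1)
    else if tol then
      adGo (arr.eraseIdx i) false 0   -- del arr[i]; return all_decreasing(arr)
    else
      false
  else
    true
termination_by (tol.toNat, arr.length - i)
decreasing_by
  · exact Prod.Lex.right _ (by omega)
  · cases tol with
    | false => simp_all
    | true => exact Prod.Lex.left _ _ (by simp)

def all_decreasing (arr : List Int) (tolerate_single_bad_level : Bool) : Bool :=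
  adGo arr tolerate_single_bad_level 0

-- ===== PORT B =====
-- first index i in range(len(arr)-1) with not arr[i] > arr[i+1]
def altFirstBad (arr : List Int) : Option Nat :=
  (List.range (arr.length - 1)).find?
    (fun i => !((PySem.List.pyGet? arr (i : Int)).getD 0 > (PySem.List.pyGet? arr ((i : Int) + 1)).getD 0))

-- all(arr[j] > arr[j+1] for j in range(len(arr)-1))
def altStrict (arr : List Int) : Bool :=
  (List.range (arr.length - 1)).all
    (fun j => (PySem.List.pyGet? arr (j : Int)).getD 0 > (PySem.List.pyGet? arr ((j : Int) + 1)).getD 0)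

def all_decreasing_alt (arr : List Int) (tolerate_single_bad_level : Bool) : Bool :=
  match altFirstBad arr with
  | none => true
  | some bad =>
    if tolerate_single_bad_level then altStrict (arr.eraseIdx bad) else false

-- ===== PRECONDITION & SPEC =====
def Spec_all_decreasing (arr : List Int) (tolerate_single_bad_level : Bool) (out : Bool) : Prop := out = all_decreasing_alt arr tolerate_single_bad_level
instance (arr : List Int) (tolerate_single_bad_level : Bool) (out : Bool) : Decidable (Spec_all_decreasing arr tolerate_single_bad_level out) := by unfold Spec_all_decreasing; infer_instance

-- ===== CLAIM (what is proved, stated in full; the proofs are below) =====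
def Claim_equal_all_decreasing : Prop := ∀ (arr : List Int) (tolerate_single_bad_level : Bool), Dom_all_decreasing arr tolerate_single_bad_level → Spec_all_decreasing arr tolerate_single_bad_level (all_decreasing arr tolerate_single_bad_level)

-- ===== LEMMAS AND PROOFS =====

-- the pair predicate both ports test
def gd (arr : List Int) (i : Nat) : Bool :=
  (PySem.List.pyGet? arr (i : Int)).getD 0 > (PySem.List.pyGet? arr ((i : Int) + 1)).getD 0

-- characterisation of A's scan from index i
lemma adGo_eq (arr : List Int) (tol : Bool) (i : Nat) :
    adGo arr tol i =
      match (List.range' i (arr.length - 1 - i)).find? (fun j => !gd arr j) with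
      | none => true
      | some j => if tol then adGo (arr.eraseIdx j) false 0 else false := by
  generalize hk : arr.length - 1 - i = k
  induction k generalizing i with
  | zero =>
    rw [adGo]
    simp [List.range', show ¬ i < arr.length - 1 by omega]
  | succ k ih =>
    rw [adGo]
    have hi : i < arr.length - 1 := by omega
    rw [List.range'_succ, List.find?_cons]
    by_cases hg : gd arr i
    · simp only [hi, if_pos, hg, Bool.not_true]
      rw [if_pos (of_decide_eq_true (by simpa [gd] using hg)), ih (i + 1) (by omega)]
    · simp only [hi, if_pos, hg, Bool.not_false]
      rw [if_neg (of_decide_eq_false (by simpa [gd] using hg))]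
-- find?-none ↔ all, packaged for the match
lemma match_find?_eq_all (l : List Nat) (p : Nat → Bool) :
    (match l.find? (fun j => !p j) with
      | none => true
      | some _ => false) = l.all p := by
  induction l with
  | nil => simp
  | cons x xs ih =>
    rw [List.find?_cons]
    by_cases h : p x <;> simp [h, ih]

lemma adGo_false (arr : List Int) : adGo arr false 0 = altStrict arr := by
  rw [adGo_eq]
  simp only [Nat.sub_zero, ← List.range_eq_range', if_neg (by simp : ¬ (false = true))]
  rw [match_find?_eq_all (List.range (arr.length - 1)) (gd arr)]
  simp only [altStrict]
  exact congrArg _ (funext fun j => by simp [gd])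

-- ===== VERDICT (by name: the statement is the Claim_ definition above) =====
theorem all_decreasing_spec : Claim_equal_all_decreasing := by
  intro arr tol _
  unfold Spec_all_decreasing all_decreasing all_decreasing_alt altFirstBad
  rw [adGo_eq]
  simp only [Nat.sub_zero, ← List.range_eq_range']
  have hpred : (fun j => !gd arr j) =
      (fun i : Nat => !((PySem.List.pyGet? arr (i : Int)).getD 0 > (PySem.List.pyGet? arr ((i : Int) + 1)).getD 0 : Bool)) := by
    funext j; simp [gd]
  rw [hpred]
  cases h : (List.range (arr.length - 1)).find?
      (fun i : Nat => !((PySem.List.pyGet? arr (i : Int)).getD 0 > (PySem.List.pyGet? arr ((i : Int) + 1)).getD 0 : Bool)) with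
  | none => rfl
  | some j =>
    cases tol with
    | false => rfl
    | true => simp [adGo_false]
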